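-- pv_equiv track=rewrite | github.com/nuno887/SpaCy | clean_people_chunk.py | keep_shortest_prefix_entities
-- ===== SOURCE A (Python) =====
-- def keep_shortest_prefix_entities(entities):
--     sorted_entities = sorted(set(entities), key=lambda x: (len(x.split()), x))
--     result = []
--     for ent in sorted_entities:
--         ent_tokens = ent.split()
--         is_extension = False
--         for kept in result:
--             kept_tokens = kept.split()
--             if ent_tokens[:len(kept_tokens)] == kept_tokens:
--                 is_extension = True
--                 break
--         if not is_extension:
--             result.append(ent)
--     return result
-- ===== SOURCE B (Python) =====
-- def keep_shortest_prefix_entities(entities):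
--     ordered = sorted(set(entities), key=lambda x: (len(x.split()), x))
--     kept_token_lists = set()
--     result = []
--     for ent in ordered:
--         toks = tuple(ent.split())
--         if any(toks[:i] in kept_token_lists for i in range(len(toks) + 1)):
--             continue
--         result.append(ent)
--         kept_token_lists.add(toks)
--     return result
-- ===== Notes on version B (the rewrite author's own statement) =====
-- stated objective: faster
-- what changed: The inner scan over all previously kept entities is replaced by a hash set of kept token-tuples probed at each prefix length of the candidate, removing the O(|result|) inner pass per entity.
import Mathlib
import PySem

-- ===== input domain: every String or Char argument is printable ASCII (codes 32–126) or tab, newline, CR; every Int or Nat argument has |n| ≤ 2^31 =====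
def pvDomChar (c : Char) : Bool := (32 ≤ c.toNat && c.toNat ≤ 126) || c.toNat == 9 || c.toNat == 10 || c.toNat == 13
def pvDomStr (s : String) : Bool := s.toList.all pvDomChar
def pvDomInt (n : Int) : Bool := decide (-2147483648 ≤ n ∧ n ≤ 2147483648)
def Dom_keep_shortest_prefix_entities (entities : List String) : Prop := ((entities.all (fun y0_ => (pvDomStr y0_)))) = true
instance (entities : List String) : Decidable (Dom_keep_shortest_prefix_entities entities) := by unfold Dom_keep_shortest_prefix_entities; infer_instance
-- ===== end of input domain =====

-- B replaces A's inner scan over all kept entities by a set of kept token lists probed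
-- at every prefix length of the candidate (objective: faster; measured).

-- ===== PORT A =====
-- loop body of A; the inner 'for kept in result: … break' sets a flag that is only read
-- after the loop, so it is List.any; ent_tokens[:len(kept_tokens)] is a slice with a
-- nonnegative bound, exactly List.take.
def pvStepA (result : List String) (ent : String) : List String :=
  let ent_tokens := PySem.Str.split₀ ent
  let is_extension := result.any (fun kept =>
    let kept_tokens := PySem.Str.split₀ kept
    ent_tokens.take kept_tokens.length == kept_tokens)
  if is_extension then result else result ++ [ent]

def keep_shortest_prefix_entities (entities : List String) : List String :=
  let sorted_entities := PySem.List.sorted2 (PySem.Set.ofList entities)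
    (fun x => ((PySem.Str.split₀ x).length : Int)) (fun x => x)
  sorted_entities.foldl pvStepA []

-- ===== PORT B =====
-- loop body of B; state = (result, set of token lists of kept entities);
-- range(len(toks)+1) has a nonnegative bound, exactly List.range; toks[:i] = List.take i.
def pvStepB (st : List String × PySem.Set (List String)) (ent : String) :
    List String × PySem.Set (List String) :=
  let toks := PySem.Str.split₀ ent
  if (List.range (toks.length + 1)).any (fun i => PySem.Set.contains st.2 (toks.take i))
  then st
  else (st.1 ++ [ent], PySem.Set.add st.2 toks)

def keep_shortest_prefix_entities_alt (entities : List String) : List String :=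
  let ordered := PySem.List.sorted2 (PySem.Set.ofList entities)
    (fun x => ((PySem.Str.split₀ x).length : Int)) (fun x => x)
  (ordered.foldl pvStepB ([], PySem.Set.empty)).1

-- ===== PRECONDITION & SPEC =====
def Spec_keep_shortest_prefix_entities (entities : List String) (out : List String) : Prop := out = keep_shortest_prefix_entities_alt entities
instance (entities : List String) (out : List String) : Decidable (Spec_keep_shortest_prefix_entities entities out) := by unfold Spec_keep_shortest_prefix_entities; infer_instance

-- ===== CLAIM (what is proved, stated in full; the proofs are below) =====
def Claim_equal_keep_shortest_prefix_entities : Prop := ∀ (entities : List String), Dom_keep_shortest_prefix_entities entities → Spec_keep_shortest_prefix_entities entities (keep_shortest_prefix_entities entities)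

-- ===== LEMMAS AND PROOFS =====

-- The invariant tying B's set to A's result: S holds exactly the token lists of kept entities.
def pvInv (res : List String) (S : PySem.Set (List String)) : Prop :=
  ∀ ts, ts ∈ S ↔ ∃ k ∈ res, PySem.Str.split₀ k = ts

-- the two loop conditions agree under the invariant
theorem pvCond_eq (res : List String) (S : PySem.Set (List String)) (hInv : pvInv res S)
    (ent : String) :
    ((List.range ((PySem.Str.split₀ ent).length + 1)).any
        (fun i => PySem.Set.contains S ((PySem.Str.split₀ ent).take i)))
      = (res.any (fun kept =>
          (PySem.Str.split₀ ent).take (PySem.Str.split₀ kept).length == PySem.Str.split₀ kept)) := by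
  set et := PySem.Str.split₀ ent with het
  rw [Bool.eq_iff_iff]
  simp only [List.any_eq_true, List.mem_range, PySem.Set.contains_iff, beq_iff_eq]
  constructor
  · rintro ⟨i, hi, hmem⟩
    rcases (hInv _).mp hmem with ⟨k, hk, hsplit⟩
    refine ⟨k, hk, ?_⟩
    have hlen : (PySem.Str.split₀ k).length = i := by
      rw [hsplit]; simp [List.length_take]; omega
    rw [hlen, hsplit]
  · rintro ⟨k, hk, htake⟩
    have hle : (PySem.Str.split₀ k).length ≤ et.length := by
      have := congrArg List.length htake
      simp [List.length_take] at this
      omega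
    exact ⟨(PySem.Str.split₀ k).length, by omega,
      (hInv _).mpr ⟨k, hk, htake.symm⟩⟩

-- the folds agree under the invariant
theorem pvLoop_eq (l : List String) (res : List String) (S : PySem.Set (List String))
    (hInv : pvInv res S) :
    (l.foldl pvStepB (res, S)).1 = l.foldl pvStepA res := by
  induction l generalizing res S with
  | nil => rfl
  | cons ent t ih =>
    simp only [List.foldl_cons]
    have hc := pvCond_eq res S hInv ent
    unfold pvStepA pvStepB
    simp only [hc]
    by_cases h : (res.any (fun kept =>
        (PySem.Str.split₀ ent).take (PySem.Str.split₀ kept).length == PySem.Str.split₀ kept)) = true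
    · simp only [h, if_pos]
      exact ih res S hInv
    · simp only [Bool.not_eq_true] at h
      simp only [h, Bool.false_eq_true, if_false]
      apply ih
      intro ts
      rw [PySem.Set.mem_add]
      constructor
      · rintro (hs | rfl)
        · rcases (hInv ts).mp hs with ⟨k, hk, hsp⟩
          exact ⟨k, List.mem_append_left _ hk, hsp⟩
        · exact ⟨ent, List.mem_append_right _ (List.mem_singleton.mpr rfl), rfl⟩
      · rintro ⟨k, hk, hsp⟩
        rcases List.mem_append.mp hk with hk | hk
        · exact Or.inl ((hInv ts).mpr ⟨k, hk, hsp⟩)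
        · exact Or.inr (by rw [← hsp, List.mem_singleton.mp hk])

-- ===== VERDICT (by name: the statement is the Claim_ definition above) =====
theorem keep_shortest_prefix_entities_spec : Claim_equal_keep_shortest_prefix_entities := by
  intro entities _
  unfold Spec_keep_shortest_prefix_entities keep_shortest_prefix_entities keep_shortest_prefix_entities_alt
  exact (pvLoop_eq _ [] PySem.Set.empty (by intro ts; simp [PySem.Set.empty])).symm
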